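-- pv_equiv track=rewrite | github.com/jeremiah-c-leary/vhdl-style-guide | vsg/check/identifier_alignment.py | find_identifier
-- ===== SOURCE A (Python) =====
-- def find_identifier(sString):
--
--     fKeywordFound = False
--     fSpaceAfterKeywordFound = False
--     for iIndex, sChar in enumerate(sString):
--         if not sChar.isspace() and not fKeywordFound:
--             fKeywordFound = True
--         if sChar.isspace() and fKeywordFound:
--             fSpaceAfterKeywordFound = True
--         if not sChar.isspace() and fSpaceAfterKeywordFound:
--             return iIndex
-- ===== SOURCE B (Python) =====
-- def find_identifier(sString):
--     starts = [i for i, (p, c) in enumerate(zip(' ' + sString, sString))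
--               if p.isspace() and not c.isspace()]
--     if len(starts) > 1:
--         return starts[1]
--     return None
-- ===== Notes on version B (the rewrite author's own statement) =====
-- stated objective: alternative
-- what changed: Replaced the flag-driven sequential scan by a stateless computation: zip the string with a space-prefixed shifted copy, collect all word-start indices (space-to-nonspace boundaries) in one comprehension, and return the second one.
import Mathlib
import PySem

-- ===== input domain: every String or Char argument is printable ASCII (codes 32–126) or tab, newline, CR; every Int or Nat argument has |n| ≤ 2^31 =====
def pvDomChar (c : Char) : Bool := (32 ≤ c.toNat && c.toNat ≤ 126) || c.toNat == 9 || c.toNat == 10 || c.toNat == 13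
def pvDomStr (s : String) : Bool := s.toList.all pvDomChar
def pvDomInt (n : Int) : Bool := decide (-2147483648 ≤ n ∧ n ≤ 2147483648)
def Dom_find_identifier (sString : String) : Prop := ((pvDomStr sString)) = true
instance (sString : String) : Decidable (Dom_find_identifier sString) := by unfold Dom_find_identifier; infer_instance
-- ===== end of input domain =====

-- B replaces A's flag-driven scan by a stateless boundary computation: collect all
-- space-to-nonspace boundary indices from the string zipped with its space-prefixed
-- shift, and return the second one (alternative decomposition, same O(n) cost).

-- ===== PORT A =====
-- flag-carrying loop over the characters, index carried as Int (enumerate)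
def pvFindA : List Char → Int → Bool → Bool → Option Int
  | [], _, _, _ => none
  | c :: rest, i, fKeywordFound, fSpaceAfterKeywordFound =>
    let kw := if !(PySem.Chars.isspace c) && !fKeywordFound then true else fKeywordFound
    let sp := if (PySem.Chars.isspace c) && kw then true else fSpaceAfterKeywordFound
    if !(PySem.Chars.isspace c) && sp then some i
    else pvFindA rest (i + 1) kw sp

def find_identifier (sString : String) : Option Int :=
  pvFindA sString.toList 0 false false

-- ===== PORT B =====
-- starts = [i for i, (p, c) in enumerate(zip(' ' + sString, sString)) if p.isspace() and not c.isspace()]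
-- return starts[1] if len(starts) > 1 else None
def find_identifier_alt (sString : String) : Option Int :=
  let l := sString.toList
  let starts :=
    ((PySem.List.enumerate (List.zip (' ' :: l) l) 0).filter
      (fun p => PySem.Chars.isspace p.2.1 && !PySem.Chars.isspace p.2.2)).map (·.1)
  match starts with
  | _ :: i :: _ => some i
  | _ => none

-- ===== PRECONDITION & SPEC =====
def Spec_find_identifier (sString : String) (out : Option Int) : Prop := out = find_identifier_alt sString
instance (sString : String) (out : Option Int) : Decidable (Spec_find_identifier sString out) := by unfold Spec_find_identifier; infer_instance

-- ===== CLAIM (what is proved, stated in full; the proofs are below) =====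
def Claim_equal_find_identifier : Prop := ∀ (sString : String), Dom_find_identifier sString → Spec_find_identifier sString (find_identifier sString)

-- ===== LEMMAS AND PROOFS =====

-- proof-only helpers: the three staged scans both programs can be reduced to
def pvSkipWS : List Char → Int → List Char × Int
  | [], i => ([], i)
  | c :: r, i => if PySem.Chars.isspace c then pvSkipWS r (i + 1) else (c :: r, i)

def pvSkipNonWS : List Char → Int → List Char × Int
  | [], i => ([], i)
  | c :: r, i => if !(PySem.Chars.isspace c) then pvSkipNonWS r (i + 1) else (c :: r, i)

-- proof-only helper: recursive form of B's boundary-index list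
def pvStartsF : Char → List Char → Int → List Int
  | _, [], _ => []
  | p, c :: r, i =>
    if PySem.Chars.isspace p && !PySem.Chars.isspace c then i :: pvStartsF c r (i + 1)
    else pvStartsF c r (i + 1)

-- phase 3: with both flags set, A returns the index of the next non-space character (if any)
theorem pvFindA_tt (l : List Char) (i : Int) :
    pvFindA l i true true =
      (if (pvSkipWS l i).1.isEmpty then none else some (pvSkipWS l i).2) := by
  induction l generalizing i with
  | nil => simp [pvFindA, pvSkipWS]
  | cons c r ih =>
      by_cases h : PySem.Chars.isspace c = true
      · simp [pvFindA, pvSkipWS, h, ih]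
      · simp [pvFindA, pvSkipWS, h]

-- phase 2: with the keyword flag set, A first skips the keyword's non-space characters
theorem pvFindA_tf (l : List Char) (i : Int) :
    pvFindA l i true false =
      pvFindA (pvSkipNonWS l i).1 (pvSkipNonWS l i).2 true true := by
  induction l generalizing i with
  | nil => simp [pvFindA, pvSkipNonWS]
  | cons c r ih =>
      by_cases h : PySem.Chars.isspace c = true
      · simp [pvFindA, pvSkipNonWS, h]
      · simp [pvFindA, pvSkipNonWS, h, ih]

-- phase 1: with no flag set, A first skips leading whitespace
theorem pvFindA_ff (l : List Char) (i : Int) :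
    pvFindA l i false false =
      pvFindA (pvSkipWS l i).1 (pvSkipWS l i).2 true false := by
  induction l generalizing i with
  | nil => simp [pvFindA, pvSkipWS]
  | cons c r ih =>
      by_cases h : PySem.Chars.isspace c = true
      · simp [pvFindA, pvSkipWS, h, ih]
      · simp [pvFindA, pvSkipWS, h]

-- B's enumerate/zip/filter/map pipeline computes pvStartsF
theorem starts_eq_pvStartsF (l : List Char) (p : Char) (i : Int) :
    ((PySem.List.enumerate (List.zipWith Prod.mk (p :: l) l) i).filter
      (fun q => PySem.Chars.isspace q.2.1 && !PySem.Chars.isspace q.2.2)).map (·.1)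
      = pvStartsF p l i := by
  induction l generalizing p i with
  | nil => simp [pvStartsF, PySem.List.enumerate_nil]
  | cons c r ih =>
      by_cases h : (PySem.Chars.isspace p && !PySem.Chars.isspace c) = true
      · simp [List.zipWith, PySem.List.enumerate_cons, h, pvStartsF, ih]
      · simp [List.zipWith, PySem.List.enumerate_cons, h, pvStartsF, ih]

-- with preceding whitespace, the boundary list first skips whitespace
theorem pvStartsF_space (l : List Char) (p : Char) (i : Int)
    (hp : PySem.Chars.isspace p = true) :
    pvStartsF p l i =
      (match pvSkipWS l i with
       | ([], _) => []
       | (c :: r, j) => j :: pvStartsF c r (j + 1)) := by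
  induction l generalizing p i with
  | nil => simp [pvStartsF, pvSkipWS]
  | cons c r ih =>
      by_cases h : PySem.Chars.isspace c = true
      · simp [pvStartsF, pvSkipWS, h, hp, ih c (i + 1) h]
      · simp [pvStartsF, pvSkipWS, h, hp]

-- with a preceding non-space, the boundary list first skips non-space characters
theorem pvStartsF_nonspace (l : List Char) (p : Char) (i : Int)
    (hp : PySem.Chars.isspace p = false) :
    pvStartsF p l i =
      (match pvSkipNonWS l i with
       | ([], _) => []
       | (c :: r, j) => pvStartsF c r (j + 1)) := by
  induction l generalizing p i with
  | nil => simp [pvStartsF, pvSkipNonWS]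
  | cons c r ih =>
      by_cases h : PySem.Chars.isspace c = true
      · simp [pvStartsF, pvSkipNonWS, h, hp]
      · simp [pvStartsF, pvSkipNonWS, h, hp, ih c (i + 1) (by simpa using h)]

-- the character pvSkipWS stops at is not whitespace
theorem pvSkipWS_head (l : List Char) (i : Int) (c : Char) (r : List Char) (j : Int)
    (h : pvSkipWS l i = (c :: r, j)) : PySem.Chars.isspace c = false := by
  induction l generalizing i with
  | nil => simp [pvSkipWS] at h
  | cons a s ih =>
      by_cases ha : PySem.Chars.isspace a = true
      · exact ih (i + 1) (by simpa [pvSkipWS, ha] using h)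
      · simp [pvSkipWS, ha] at h
        simp [← h.1.1, ha]

-- the character pvSkipNonWS stops at is whitespace
theorem pvSkipNonWS_head (l : List Char) (i : Int) (c : Char) (r : List Char) (j : Int)
    (h : pvSkipNonWS l i = (c :: r, j)) : PySem.Chars.isspace c = true := by
  induction l generalizing i with
  | nil => simp [pvSkipNonWS] at h
  | cons a s ih =>
      by_cases ha : PySem.Chars.isspace a = true
      · simp [pvSkipNonWS, ha] at h
        simp [← h.1.1, ha]
      · exact ih (i + 1) (by simpa [pvSkipNonWS, ha] using h)

-- ===== VERDICT (by name: the statement is the Claim_ definition above) =====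
theorem find_identifier_spec : Claim_equal_find_identifier := by
  intro s _
  unfold Spec_find_identifier find_identifier find_identifier_alt
  rw [pvFindA_ff, pvFindA_tf, pvFindA_tt]
  simp only [List.zip]
  rw [starts_eq_pvStartsF, pvStartsF_space _ _ _ (by decide)]
  rcases h1 : pvSkipWS s.toList 0 with ⟨l1, j1⟩
  cases l1 with
  | nil => simp [pvSkipNonWS, pvSkipWS]
  | cons c1 r1 =>
      have hc1 := pvSkipWS_head _ _ _ _ _ h1
      dsimp only
      rw [pvStartsF_nonspace _ _ _ hc1]
      have h2 : pvSkipNonWS (c1 :: r1) j1 = pvSkipNonWS r1 (j1 + 1) := by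
        simp [pvSkipNonWS, hc1]
      rw [h2]
      rcases h3 : pvSkipNonWS r1 (j1 + 1) with ⟨l2, j2⟩
      cases l2 with
      | nil => simp [pvSkipWS]
      | cons c2 r2 =>
          have hc2 := pvSkipNonWS_head _ _ _ _ _ h3
          dsimp only
          rw [pvStartsF_space _ _ _ hc2]
          have h4 : pvSkipWS (c2 :: r2) j2 = pvSkipWS r2 (j2 + 1) := by
            simp [pvSkipWS, hc2]
          rw [h4]
          rcases h5 : pvSkipWS r2 (j2 + 1) with ⟨l3, j3⟩
          cases l3 <;> simp
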